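-- pv_equiv track=rewrite | github.com/crixox29/AdventOfCode2023 | dayOne/day1.py | find_substrings_with_digits
-- ===== SOURCE A (Python) =====
-- word_to_number = {
--     'zero' : 0,
--     'one': 1,
--     'two': 2,
--     'three': 3,
--     'four': 4,
--     'five': 5,
--     'six': 6,
--     'seven': 7,
--     'eight': 8,
--     'nine': 9
-- }
--
-- def find_substrings_with_digits(string):
--     ''' Find all substrings in a string that contain digits
--     Example: "eightwothree" -> ["eight", "two", "three"]
--     The function returns the substrings in the order they appear in the string
--     and translates them to their corresponding number'''
--     substrings_with_indices = []
--
--     for word in word_to_number.keys():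
--         index = string.find(word)
--         while index != -1:
--             substrings_with_indices.append((word, index))
--             index = string.find(word, index + 1)
--
--     # sort the substrings based on their indices
--     substrings_with_indices.sort(key=lambda x: x[1])
--
--     # extract the translated numbers from the sorted substrings
--     substrings_translated = [word_to_number[word] for word, _ in substrings_with_indices]
--     return substrings_translated
-- ===== SOURCE B (Python) =====
-- WORDS = [('zero', 0), ('one', 1), ('two', 2), ('three', 3), ('four', 4),
--          ('five', 5), ('six', 6), ('seven', 7), ('eight', 8), ('nine', 9)]
--
-- def find_substrings_with_digits(string):
--     '''Single left-to-right scan: at each position try every number word by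
--     direct slice comparison; since no word is a prefix of another, at most one
--     matches per position, so results come out already in index order.'''
--     result = []
--     for i in range(len(string)):
--         for word, value in WORDS:
--             if string[i:i+len(word)] == word:
--                 result.append(value)
--     return result
-- ===== Notes on version B (the rewrite author's own statement) =====
-- stated objective: simpler
-- what changed: Replaces the per-word repeated str.find scans plus a final sort by index with a single left-to-right position scan that tests each number word by slice comparison, emitting values directly in index order (no intermediate (word,index) pairs, no sort), relying on the word set being prefix-free.
import Mathlib
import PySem

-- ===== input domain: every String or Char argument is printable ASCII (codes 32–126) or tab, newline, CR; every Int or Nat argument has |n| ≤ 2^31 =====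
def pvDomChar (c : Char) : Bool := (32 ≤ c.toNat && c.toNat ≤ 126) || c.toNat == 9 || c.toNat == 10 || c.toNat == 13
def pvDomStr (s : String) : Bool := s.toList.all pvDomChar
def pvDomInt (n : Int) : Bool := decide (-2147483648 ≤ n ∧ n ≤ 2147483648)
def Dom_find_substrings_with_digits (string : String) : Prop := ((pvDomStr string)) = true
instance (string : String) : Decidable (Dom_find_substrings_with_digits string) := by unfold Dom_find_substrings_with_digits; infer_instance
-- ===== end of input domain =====

-- B replaces A's per-word repeated str.find scans plus a final sort-by-index with one
-- left-to-right position scan testing each number word by slice comparison (objective: simpler).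

-- the number words with their values, in the insertion order of A's word_to_number dict
def pvWords : List (List Char × Int) :=
  [("zero".toList, 0), ("one".toList, 1), ("two".toList, 2), ("three".toList, 3),
   ("four".toList, 4), ("five".toList, 5), ("six".toList, 6), ("seven".toList, 7),
   ("eight".toList, 8), ("nine".toList, 9)]

-- ===== PORT A =====
def word_to_number : PySem.Dict (List Char) Int := PySem.Dict.ofList pvWords

-- A's inner `while index != -1:` loop; fuel bounds the iterations (each found index is
-- strictly larger than the previous one, so cs.length + 1 fuel always suffices — proved below)
def pvLoopA (cs w : List Char) (index : Int) (fuel : Nat) : List (List Char × Int) :=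
  match fuel with
  | 0 => []
  | Nat.succ f =>
    if index = -1 then []
    else (w, index) :: pvLoopA cs w (PySem.Chars.findFrom cs w (index + 1)) f

def find_substrings_with_digits (string : String) : List Int :=
  let cs := string.toList
  let pairs := word_to_number.keys.foldl
    (fun acc w => acc ++ pvLoopA cs w (PySem.Chars.find cs w) (cs.length + 1)) []
  let sortedPairs := PySem.List.sorted pairs (fun p => p.2)
  sortedPairs.map (fun p => PySem.Dict.getD word_to_number p.1 0)

-- ===== PORT B =====
def find_substrings_with_digits_alt (string : String) : List Int :=
  let cs := string.toList
  (PySem.List.pyRange 0 cs.length 1).foldl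
    (fun acc i => pvWords.foldl
      (fun acc2 wv =>
        if PySem.List.slice cs (some i) (some (i + wv.1.length)) == wv.1
        then acc2 ++ [wv.2] else acc2) acc) []

-- ===== PRECONDITION & SPEC =====
def Spec_find_substrings_with_digits (string : String) (out : List Int) : Prop := out = find_substrings_with_digits_alt string
instance (string : String) (out : List Int) : Decidable (Spec_find_substrings_with_digits string out) := by unfold Spec_find_substrings_with_digits; infer_instance

-- ===== CLAIM (what is proved, stated in full; the proofs are below) =====
def Claim_equal_find_substrings_with_digits : Prop := ∀ (string : String), Dom_find_substrings_with_digits string → Spec_find_substrings_with_digits string (find_substrings_with_digits string)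

-- ===== LEMMAS AND PROOFS =====

-- does word w match in cs at position i?
def pvMatchAt (cs w : List Char) (i : Nat) : Bool := decide (w <+: cs.drop i)

-- the common canonical form: scan positions left to right, at each position emit
-- (at most) the image under f of the first matching word
def pvCanon {γ : Type} (cs : List Char) (f : (List Char × Int) → Nat → γ) : List γ :=
  (List.range cs.length).flatMap
    (fun i => ((pvWords.find? (fun wv => pvMatchAt cs wv.1 i)).map (fun wv => f wv i)).toList)

-- small generic facts -------------------------------------------------------

theorem pv_map_filter {α γ : Type} (l : List α) (p : α → Bool) (f : α → γ) :
    (l.filter p).map f = l.filterMap (fun x => if p x then some (f x) else none) := by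
  induction l with
  | nil => rfl
  | cons a t ih => by_cases h : p a <;> simp [h, ih]

theorem pv_filter_eq_find?_toList {α : Type} (l : List α) (p : α → Bool)
    (h : l.Pairwise fun a b => ¬(p a = true ∧ p b = true)) :
    l.filter p = (l.find? p).toList := by
  induction l with
  | nil => rfl
  | cons a t ih =>
    rcases List.pairwise_cons.mp h with ⟨ha, ht⟩
    by_cases hp : p a
    · have hnil : t.filter p = [] := by
        apply List.filter_eq_nil_iff.mpr
        intro b hb hpb
        exact ha b hb ⟨hp, hpb⟩
      simp [hp, hnil]
    · simp [hp, ih ht]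

theorem pv_flatMap_toList {β γ : Type} (l : List β) (f : β → Option γ) :
    l.flatMap (fun b => (f b).toList) = l.filterMap f :=
  (List.filterMap_eq_flatMap_toList f l).symm

theorem pv_swap_perm {α β γ : Type} (as : List α) (bs : List β) (g : α → β → Option γ) :
    (as.flatMap fun a => bs.filterMap fun b => g a b).Perm
      (bs.flatMap fun b => as.filterMap fun a => g a b) := by
  induction as with
  | nil => simp
  | cons a as ih =>
    rw [List.flatMap_cons]
    refine List.Perm.trans (List.Perm.append_left _ ih) ?_
    rw [← pv_flatMap_toList bs (fun b => g a b)]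
    refine List.Perm.trans (List.flatMap_append_perm bs _ _) ?_
    rw [show (fun b => (g a b).toList ++ as.filterMap fun a => g a b)
          = (fun b => (a :: as).filterMap fun a => g a b) from ?_]
    funext b
    cases hg : g a b <;> simp [hg]

-- facts about the word table ------------------------------------------------

theorem pv_words_prefix_free :
    pvWords.Pairwise (fun p q => ¬ (p.1 <+: q.1) ∧ ¬ (q.1 <+: p.1)) := by decide

theorem pv_words_ne_nil : ∀ wv ∈ pvWords, wv.1 ≠ [] := by decide

theorem pv_words_getD : ∀ wv ∈ pvWords, PySem.Dict.getD word_to_number wv.1 0 = wv.2 := by decide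

theorem pv_keys : word_to_number.keys = pvWords.map (·.1) := by decide

-- at any position, at most one of the (prefix-free) number words matches
theorem pv_match_unique (cs : List Char) (i : Nat) :
    pvWords.Pairwise (fun a b => ¬(pvMatchAt cs a.1 i = true ∧ pvMatchAt cs b.1 i = true)) := by
  refine pv_words_prefix_free.imp ?_
  intro a b hab h
  rcases h with ⟨ha, hb⟩
  simp [pvMatchAt] at ha hb
  rcases List.prefix_or_prefix_of_prefix ha hb with h | h
  · exact hab.1 h
  · exact hab.2 h

-- B equals the canonical scan ------------------------------------------------

theorem pv_slice_test (cs w : List Char) (i : Nat) :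
    (PySem.List.slice cs (some (i:Int)) (some ((i:Int) + (w.length:Int))) == w) = pvMatchAt cs w i := by
  rw [PySem.List.slice_toNat cs (by positivity) (by positivity)]
  rw [show ((i:Int) + (w.length:Int)).toNat - (i:Int).toNat = w.length by omega,
      show ((i:Int)).toNat = i by omega]
  apply Bool.eq_iff_iff.mpr
  rw [beq_iff_eq]
  unfold pvMatchAt
  rw [decide_eq_true_iff, List.prefix_iff_eq_take]
  exact eq_comm

theorem pv_block_B (cs : List Char) (i : Nat) (acc : List Int) :
    pvWords.foldl
      (fun acc2 wv =>
        if PySem.List.slice cs (some (i:Int)) (some ((i:Int) + wv.1.length)) == wv.1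
        then acc2 ++ [wv.2] else acc2) acc
    = acc ++ ((pvWords.find? (fun wv => pvMatchAt cs wv.1 i)).map (fun wv => wv.2)).toList := by
  have hfn : (fun (acc2 : List Int) (wv : List Char × Int) =>
        if PySem.List.slice cs (some (i:Int)) (some ((i:Int) + wv.1.length)) == wv.1
        then acc2 ++ [wv.2] else acc2)
      = (fun acc2 wv => if pvMatchAt cs wv.1 i = true
          then acc2 ++ [(fun wv : List Char × Int => wv.2) wv] else acc2) := by
    funext acc2 wv
    rw [pv_slice_test cs wv.1 i]
  rw [hfn, PySem.List.foldl_append_if, pv_filter_eq_find?_toList _ _ (pv_match_unique cs i),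
      ← Option.toList_map]

theorem pv_B_canon (s : String) :
    find_substrings_with_digits_alt s = pvCanon s.toList (fun wv _ => wv.2) := by
  unfold find_substrings_with_digits_alt pvCanon
  dsimp only
  rw [PySem.List.pyRange_one]
  simp only [Int.sub_zero, Int.toNat_natCast, List.foldl_map]
  have main : ∀ (l : List Nat) (acc : List Int),
      List.foldl (fun (x : List Int) (y : Nat) => pvWords.foldl
        (fun acc2 wv =>
          if PySem.List.slice s.toList (some ((0:Int) + y)) (some ((0:Int) + y + wv.1.length)) == wv.1
          then acc2 ++ [wv.2] else acc2) x) acc l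
      = acc ++ l.flatMap (fun i =>
          ((pvWords.find? (fun wv => pvMatchAt s.toList wv.1 i)).map (fun wv => wv.2)).toList) := by
    intro l
    induction l with
    | nil => simp
    | cons i t ih =>
      intro acc
      rw [List.foldl_cons]
      have h0 : ((0:Int) + (i:Int)) = (i:Int) := by omega
      rw [h0, pv_block_B, ih, List.flatMap_cons, List.append_assoc]
  rw [main]
  simp

-- A's while loop collects exactly the match positions of w, in increasing order --------

theorem pv_loopA_spec (cs w : List Char) (hw : w ≠ []) :
    ∀ fuel k, k ≤ cs.length → cs.length + 1 - k ≤ fuel →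
    pvLoopA cs w (PySem.Chars.findFrom cs w (k : Nat)) fuel
      = ((List.range' k (cs.length - k)).filter (fun i => pvMatchAt cs w i)).map
          (fun (i : Nat) => (w, (i : Int))) := by
  intro fuel
  induction fuel with
  | zero => intro k hk hf; omega
  | succ f ih =>
    intro k hk hf
    by_cases hF : PySem.Chars.findFrom cs w (k : Nat) = -1
    · have hni := (PySem.Chars.findFrom_natCast_eq_neg_one_iff cs w k hk).mp hF
      have hfil : (List.range' k (cs.length - k)).filter (fun i => pvMatchAt cs w i) = [] := by
        apply List.filter_eq_nil_iff.mpr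
        intro i hi hm
        rcases List.mem_range'_1.mp hi with ⟨hki, _⟩
        have hp : w <+: (cs.drop k).drop (i - k) := by
          rw [List.drop_drop, show k + (i - k) = i by omega]
          exact of_decide_eq_true hm
        exact hni (hp.isInfix.trans (List.drop_suffix (i-k) (cs.drop k)).isInfix)
      simp [pvLoopA, hF, hfil]
    · obtain ⟨hle, hmatch, hmin⟩ := PySem.Chars.findFrom_natCast_spec cs w k hk hF
      set F := PySem.Chars.findFrom cs w (k : Nat) with hFdef
      have h0 : 0 ≤ F := le_trans (by positivity) hle
      set j := F.toNat with hjdef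
      have hFj : F = (j : Int) := by omega
      have hkj : k ≤ j := by omega
      have hjn : j < cs.length := by
        have h1 := hmatch.length_le
        have h2 : 0 < w.length := List.length_pos_iff.mpr hw
        simp [List.length_drop] at h1
        omega
      have hsplit : List.range' k (cs.length - k)
          = List.range' k (j - k) ++ List.range' j (cs.length - j) := by
        have h := List.range'_append_1 (m := j - k) (n := cs.length - j) (s := k)
        rw [show k + (j - k) = j by omega] at h
        rw [show cs.length - k = (j - k) + (cs.length - j) by omega]
        exact h.symm
      have hfil1 : (List.range' k (j - k)).filter (fun i => pvMatchAt cs w i) = [] := by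
        apply List.filter_eq_nil_iff.mpr
        intro i hi hm
        rcases List.mem_range'_1.mp hi with ⟨hki, hik⟩
        exact hmin i hki (by omega) (of_decide_eq_true hm)
      have hstep : List.range' j (cs.length - j) = j :: List.range' (j+1) (cs.length - (j+1)) := by
        rw [show cs.length - j = (cs.length - (j+1)) + 1 by omega, List.range'_succ]
      have hmj : pvMatchAt cs w j = true := decide_eq_true hmatch
      show pvLoopA cs w F (f+1) = _
      rw [pvLoopA]
      simp only [hF, if_false]
      rw [hsplit, List.filter_append, hfil1, hstep, List.filter_cons, hmj]
      simp only [if_true, List.nil_append]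
      congr 1
      · rw [hFj]
      · rw [hFj, show ((j:Int) + 1) = ((j+1 : Nat) : Int) by push_cast; ring]
        exact ih (j+1) (by omega) (by omega)

-- A equals the canonical scan -------------------------------------------------

theorem pv_A_canon (s : String) :
    find_substrings_with_digits s
      = pvCanon s.toList (fun wv _ => PySem.Dict.getD word_to_number wv.1 0) := by
  unfold find_substrings_with_digits
  dsimp only
  rw [pv_keys, List.foldl_map, PySem.List.foldl_append_eq_flatMap, List.nil_append]
  have hloop : (pvWords.flatMap fun wv =>
        pvLoopA s.toList wv.1 (PySem.Chars.find s.toList wv.1) (s.toList.length + 1))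
      = pvWords.flatMap (fun wv => (List.range s.toList.length).filterMap
          (fun i => if pvMatchAt s.toList wv.1 i then some (wv.1, (i:Int)) else none)) := by
    apply List.flatMap_congr
    intro wv hwv
    rw [← PySem.Chars.findFrom_zero s.toList wv.1,
        show (0:Int) = ((0:Nat):Int) by norm_num,
        pv_loopA_spec s.toList wv.1 (pv_words_ne_nil wv hwv) (s.toList.length + 1) 0
          (by omega) (by omega)]
    rw [Nat.sub_zero, ← List.range_eq_range', pv_map_filter]
  rw [hloop]
  have hperm := pv_swap_perm pvWords (List.range s.toList.length)
    (fun wv i => if pvMatchAt s.toList wv.1 i then some (wv.1, (i:Int)) else none)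
  have hTeq : ((List.range s.toList.length).flatMap fun i => pvWords.filterMap
        fun wv => if pvMatchAt s.toList wv.1 i then some (wv.1, (i:Int)) else none)
      = pvCanon s.toList (fun wv i => (wv.1, (i:Int))) := by
    unfold pvCanon
    apply List.flatMap_congr
    intro i _
    rw [← pv_map_filter, pv_filter_eq_find?_toList _ _ (pv_match_unique s.toList i),
        ← Option.toList_map]
  rw [hTeq] at hperm
  have hTpair : (pvCanon s.toList (fun wv i => (wv.1, (i:Int)))).Pairwise
      (fun a b => a.2 < b.2) := by
    unfold pvCanon
    rw [pv_flatMap_toList]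
    apply List.pairwise_filterMap.mpr
    refine List.pairwise_lt_range.imp ?_
    intro i i' hii' b hb b' hb'
    rcases Option.map_eq_some_iff.mp hb with ⟨wv, _, rfl⟩
    rcases Option.map_eq_some_iff.mp hb' with ⟨wv', _, rfl⟩
    dsimp only
    exact_mod_cast hii'
  rw [PySem.List.sorted_eq_of_perm_of_pairwise_lt _ _ _ hperm.symm hTpair]
  unfold pvCanon
  rw [List.map_flatMap]
  apply List.flatMap_congr
  intro i _
  rw [← Option.toList_map, Option.map_map]
  rfl

-- ===== VERDICT (by name: the statement is the Claim_ definition above) =====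
theorem find_substrings_with_digits_spec : Claim_equal_find_substrings_with_digits := by
  intro s _
  show find_substrings_with_digits s = find_substrings_with_digits_alt s
  rw [pv_A_canon, pv_B_canon]
  unfold pvCanon
  apply List.flatMap_congr
  intro i _
  cases hf : pvWords.find? (fun wv => pvMatchAt s.toList wv.1 i) with
  | none => rfl
  | some wv =>
    have := pv_words_getD wv (List.mem_of_find?_eq_some hf)
    simp [this]
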